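-- pv_equiv track=rewrite | github.com/ruppysuppy/Daily-Coding-Problem-Solutions | Solutions/114.py | rev_words
-- ===== SOURCE A (Python) =====
-- def rev_words(string, delimiters):
--     # if the string is empty, its returned
--     if len(string) == 0:
--         return string
--
--     # words stores the words in the string
--     words = []
--     # delims stores the delimiters in the string
--     delims = []
--     # flag_beg checks whether the 1st character is a delimiter
--     flag_beg = string[0] in delimiters
--     # flag_delim checks whether the current string is a delimiter
--     flag_delim = False
--     # temp stores the current part of the string (word or delimiter)
--     temp = ""
--
--     # iterating over the string
--     for char in string:
--         # if the character is a delimiter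
--         if char in delimiters:
--             # if temp contains delimiters
--             if flag_delim:
--                 # the character is added to temp
--                 temp += char
--             else:
--                 # if temp contained a word, its added to word list
--                 if temp:
--                     words.append(temp)
--                 # temp is set to the current delimiter and flag_delim is set
--                 temp = char
--                 flag_delim = True
--         # if the character is not a delimiter
--         else:
--             # if temp contains delimiters, flag is reset, temp is added to delimiters and set to the current character
--             if flag_delim:
--                 flag_delim = False
--                 delims.append(temp)
--                 temp = char
--             # else, the character is added to temp
--             else:
--                 temp += char
--
--     # if the last character is a delimiter, its added to delimiter
--     if flag_delim:
--         delims.append(temp)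
--     # else its added to words
--     else:
--         words.append(temp)
--
--     # reversing the word list and adding empty strings at the end of both lists to avoid index errors
--     words = words[::-1]
--     words.append("")
--     delims.append("")
--
--     # getting the length of the words
--     len_words = len(words)
--     len_delims = len(delims)
--     # i, j are position markers for words and delimiters respectively
--     i = 0
--     j = 0
--     # res stores the final string
--     res = ""
--
--     # if flag_beg is set, we add the 1st delimiter and increment j
--     if flag_beg:
--         j = 1
--         res += delims[0]
--
--     # looping till the end of the end of the lists
--     while i < len_words or j < len_delims:
--         # checking for exceptions
--         try:
--             # adding the words and delimiters and incrementing i and j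
--             res += words[i]
--             res += delims[j]
--             i += 1
--             j += 1
--         # if index error occours, the control breaks out of the loop
--         except IndexError:
--             break
--
--     return res
-- ===== SOURCE B (Python) =====
-- def rev_words(string, delimiters):
--     if len(string) == 0:
--         return string
--     # one pass: split into maximal runs [is_delimiter, [chars]]
--     runs = []
--     for char in string:
--         is_delim = char in delimiters
--         if runs and runs[-1][0] == is_delim:
--             runs[-1][1].append(char)
--         else:
--             runs.append([is_delim, [char]])
--     runs = [(is_delim, "".join(chars)) for is_delim, chars in runs]
--     # reverse the word texts, refill by position
--     rev = [text for is_delim, text in runs if not is_delim][::-1]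
--     out = []
--     i = 0
--     for is_delim, text in runs:
--         if is_delim:
--             out.append(text)
--         else:
--             out.append(rev[i])
--             i += 1
--     return "".join(out)
-- ===== Notes on version B (the rewrite author's own statement) =====
-- stated objective: simpler
-- what changed: B replaces A's four-variable state-machine scan plus reversed-lists index-interleave (with sentinel empty strings and try/except) by one grouping pass into (is_delimiter, text) runs, reversing the word texts and refilling them by position.
import Mathlib
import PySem

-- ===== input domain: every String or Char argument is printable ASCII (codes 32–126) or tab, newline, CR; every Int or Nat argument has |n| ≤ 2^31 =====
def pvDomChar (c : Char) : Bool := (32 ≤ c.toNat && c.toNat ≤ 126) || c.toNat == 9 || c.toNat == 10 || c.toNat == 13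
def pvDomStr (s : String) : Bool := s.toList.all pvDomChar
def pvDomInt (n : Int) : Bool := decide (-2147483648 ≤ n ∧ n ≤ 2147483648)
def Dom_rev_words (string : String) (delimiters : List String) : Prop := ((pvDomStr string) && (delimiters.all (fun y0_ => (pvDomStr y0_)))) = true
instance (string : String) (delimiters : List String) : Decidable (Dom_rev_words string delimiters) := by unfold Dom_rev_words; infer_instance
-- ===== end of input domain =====

-- B re-implements A by one-pass grouping into delimiter/word runs, reversing the word
-- texts and refilling them by position (objective: simpler decomposition, same cost).

-- ===== PORT A =====

-- `char in delimiters`: a one-character string compared against each delimiter string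
def pvIsDelim (delimiters : List String) (c : Char) : Bool :=
  delimiters.contains (String.singleton c)

-- the `for char in string` loop of A, carrying its four mutable variables
def pvScanA (p : Char → Bool) : List Char → List (List Char) → List (List Char) →
    Bool → List Char → List (List Char) × List (List Char) × Bool × List Char
  | [], words, delims, flag_delim, temp => (words, delims, flag_delim, temp)
  | c :: rest, words, delims, flag_delim, temp =>
    if p c then
      if flag_delim then
        pvScanA p rest words delims true (temp ++ [c])
      else
        pvScanA p rest (if temp = [] then words else words ++ [temp]) delims true [c]
    else
      if flag_delim then
        pvScanA p rest words (delims ++ [temp]) false [c]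
      else
        pvScanA p rest words delims false (temp ++ [c])

-- the `while i < len_words or j < len_delims` loop with its try/except IndexError
def pvInterA (words delims : List (List Char)) (i j : Nat) : List Char :=
  if i < words.length ∨ j < delims.length then
    if hi : i < words.length then
      if hj : j < delims.length then
        words[i] ++ delims[j] ++ pvInterA words delims (i + 1) (j + 1)
      else
        words[i]        -- res += words[i] succeeded, delims[j] raised IndexError
    else
      []                -- words[i] raised IndexError
  else
    []
termination_by words.length + delims.length - (i + j)
decreasing_by omega

def rev_words (string : String) (delimiters : List String) : String :=
  if string.toList.length = 0 then string
  else
    let p := pvIsDelim delimiters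
    let cs := string.toList
    let flag_beg := p (cs.headD default)   -- string[0]; cs is nonempty here
    let r := pvScanA p cs [] [] false []
    let words₁ := if r.2.2.1 then r.1 else r.1 ++ [r.2.2.2]
    let delims₁ := if r.2.2.1 then r.2.1 ++ [r.2.2.2] else r.2.1
    let words := words₁.reverse ++ [[]]    -- words[::-1]; words.append("")
    let delims := delims₁ ++ [[]]          -- delims.append("")
    let res₀ := if flag_beg then (delims.headD []) else []
    let j₀ := if flag_beg then 1 else 0
    String.ofList (res₀ ++ pvInterA words delims 0 j₀)

-- ===== PORT B =====

-- one pass grouping the string into maximal runs (is_delimiter, text)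
def pvRuns (p : Char → Bool) : List Char → List (Bool × List Char)
  | [] => []
  | c :: rest =>
    match pvRuns p rest with
    | (b, t) :: rs => if p c = b then (b, c :: t) :: rs else (p c, [c]) :: (b, t) :: rs
    | [] => [(p c, [c])]

-- emit delimiter runs as they are, word runs from the reversed word list in order
def pvRefill : List (Bool × List Char) → List (List Char) → List Char
  | [], _ => []
  | (true, t) :: rs, ws => t ++ pvRefill rs ws
  | (false, _) :: rs, ws => ws.headD [] ++ pvRefill rs ws.tail

def rev_words_alt (string : String) (delimiters : List String) : String :=
  if string.toList.length = 0 then string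
  else
    let runs := pvRuns (pvIsDelim delimiters) string.toList
    let rev := ((runs.filter (fun r => !r.1)).map (·.2)).reverse
    String.ofList (pvRefill runs rev)

-- ===== PRECONDITION & SPEC =====
def Spec_rev_words (string : String) (delimiters : List String) (out : String) : Prop := out = rev_words_alt string delimiters
instance (string : String) (delimiters : List String) (out : String) : Decidable (Spec_rev_words string delimiters out) := by unfold Spec_rev_words; infer_instance

-- ===== CLAIM (what is proved, stated in full; the proofs are below) =====
def Claim_equal_rev_words : Prop := ∀ (string : String) (delimiters : List String), Dom_rev_words string delimiters → Spec_rev_words string delimiters (rev_words string delimiters)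

-- ===== LEMMAS AND PROOFS =====

-- word texts / delimiter texts of a run list
def pvFT (R : List (Bool × List Char)) : List (List Char) := (R.filter (fun r => !r.1)).map (·.2)
def pvTT (R : List (Bool × List Char)) : List (List Char) := (R.filter (fun r => r.1)).map (·.2)

-- prepend a (possibly mergeable) run in front of a run list
def pvGlue (k : Bool) (t : List Char) (rs : List (Bool × List Char)) : List (Bool × List Char) :=
  match rs with
  | (b, u) :: rs' => if k = b then (b, t ++ u) :: rs' else (k, t) :: (b, u) :: rs'
  | [] => [(k, t)]

theorem pvRuns_cons (p : Char → Bool) (c : Char) (cs : List Char) :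
    pvRuns p (c :: cs) = pvGlue (p c) [c] (pvRuns p cs) := by
  simp only [pvRuns, pvGlue]
  cases pvRuns p cs with
  | nil => rfl
  | cons r rs => cases r with | mk b t => rfl

theorem pvGlue_head (k : Bool) (t : List Char) (rs : List (Bool × List Char)) :
    ∃ u, (pvGlue k t rs).head? = some (k, u) := by
  cases rs with
  | nil => exact ⟨t, rfl⟩
  | cons r rs' =>
    cases r with | mk b u =>
    by_cases h : k = b
    · subst h; exact ⟨t ++ u, by simp [pvGlue]⟩
    · exact ⟨t, by simp [pvGlue, h]⟩

theorem pvGlue_glue (k : Bool) (t : List Char) (c : Char) (rs : List (Bool × List Char)) :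
    pvGlue k t (pvGlue k [c] rs) = pvGlue k (t ++ [c]) rs := by
  cases rs with
  | nil => simp [pvGlue]
  | cons r rs' =>
    cases r with | mk b u =>
    by_cases h : k = b
    · subst h; simp [pvGlue]
    · simp [pvGlue, h]

theorem pvGlue_ne (k k' : Bool) (t : List Char) (c : Char) (rs : List (Bool × List Char))
    (h : k ≠ k') : pvGlue k t (pvGlue k' [c] rs) = (k, t) :: pvGlue k' [c] rs := by
  obtain ⟨u, hu⟩ := pvGlue_head k' [c] rs
  cases hrs : pvGlue k' [c] rs with
  | nil => simp [hrs] at hu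
  | cons r rs' =>
    rw [hrs] at hu
    simp only [List.head?] at hu
    cases r with | mk b v =>
    cases hu
    simp [pvGlue, h]

theorem pvFT_cons_true (t : List Char) (R : List (Bool × List Char)) :
    pvFT ((true, t) :: R) = pvFT R := by simp [pvFT]
theorem pvFT_cons_false (t : List Char) (R : List (Bool × List Char)) :
    pvFT ((false, t) :: R) = t :: pvFT R := by simp [pvFT]
theorem pvTT_cons_true (t : List Char) (R : List (Bool × List Char)) :
    pvTT ((true, t) :: R) = t :: pvTT R := by simp [pvTT]
theorem pvTT_cons_false (t : List Char) (R : List (Bool × List Char)) :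
    pvTT ((false, t) :: R) = pvTT R := by simp [pvTT]

-- the words/delims lists after the final `if flag_delim` append
def pvPost (r : List (List Char) × List (List Char) × Bool × List Char) :
    List (List Char) × List (List Char) :=
  if r.2.2.1 then (r.1, r.2.1 ++ [r.2.2.2]) else (r.1 ++ [r.2.2.2], r.2.1)

-- loop invariant for A's scan: the state represents the runs of the rest glued onto temp
theorem pvScanA_inv (p : Char → Bool) (cs : List Char) :
    ∀ (ws ds : List (List Char)) (flag : Bool) (t : List Char), t ≠ [] →
    pvPost (pvScanA p cs ws ds flag t) =
      (ws ++ pvFT (pvGlue flag t (pvRuns p cs)), ds ++ pvTT (pvGlue flag t (pvRuns p cs))) := by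
  induction cs with
  | nil =>
    intro ws ds flag t ht
    cases flag <;> simp [pvScanA, pvPost, pvGlue, pvFT, pvTT, pvRuns]
  | cons c rest ih =>
    intro ws ds flag t ht
    rw [pvRuns_cons]
    by_cases hc : p c
    · cases flag
      · -- p c true, flag false
        simp only [pvScanA, hc, Bool.false_eq_true, reduceIte, ht]
        rw [ih (ws ++ [t]) ds true [c] (by simp),
          pvGlue_ne false true t c (pvRuns p rest) (by simp)]
        rw [pvFT_cons_false, pvTT_cons_false]
        simp
      · -- p c true, flag true
        simp only [pvScanA, hc, if_pos]
        rw [ih ws ds true (t ++ [c]) (by simp),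
          pvGlue_glue true t c (pvRuns p rest)]
    · cases flag
      · -- p c false, flag false
        simp only [pvScanA, hc, Bool.false_eq_true, reduceIte]
        rw [ih ws ds false (t ++ [c]) (by simp),
          pvGlue_glue false t c (pvRuns p rest)]
      · -- p c false, flag true
        simp only [pvScanA, hc, Bool.false_eq_true, reduceIte]
        rw [ih ws (ds ++ [t]) false [c] (by simp),
          pvGlue_ne true false t c (pvRuns p rest) (by simp)]
        rw [pvFT_cons_true, pvTT_cons_true]
        simp

theorem pvScanA_runs (p : Char → Bool) (c : Char) (rest : List Char) :
    pvPost (pvScanA p (c :: rest) [] [] false []) =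
      (pvFT (pvRuns p (c :: rest)), pvTT (pvRuns p (c :: rest))) := by
  rw [pvRuns_cons]
  by_cases hc : p c
  · rw [show pvScanA p (c :: rest) [] [] false [] = pvScanA p rest [] [] true [c] by
      simp [pvScanA, hc]]
    rw [pvScanA_inv p rest [] [] true [c] (by simp)]
    simp [hc]
  · rw [show pvScanA p (c :: rest) [] [] false [] = pvScanA p rest [] [] false [c] by
      simp [pvScanA, hc]]
    rw [pvScanA_inv p rest [] [] false [c] (by simp)]
    have hcf : p c = false := by simpa using hc
    simp [hcf]

-- interleave on lists: what A's index loop computes from position (i, j)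
def pvInterL : List (List Char) → List (List Char) → List Char
  | [], _ => []
  | w :: _, [] => w
  | w :: ws, d :: ds => w ++ d ++ pvInterL ws ds

theorem pvInterA_eq_aux (ws ds : List (List Char)) :
    ∀ (k i j : Nat), ws.length - i ≤ k →
    pvInterA ws ds i j = pvInterL (ws.drop i) (ds.drop j) := by
  intro k
  induction k with
  | zero =>
    intro i j h
    have hi : ¬ i < ws.length := by omega
    rw [pvInterA]
    simp only [hi]
    rw [List.drop_eq_nil_of_le (by omega)]
    simp [pvInterL]
  | succ k ih =>
    intro i j h
    rw [pvInterA]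
    by_cases hi : i < ws.length
    · have hdw : ws.drop i = ws[i] :: ws.drop (i + 1) := (List.getElem_cons_drop hi).symm
      by_cases hj : j < ds.length
      · have hdd : ds.drop j = ds[j] :: ds.drop (j + 1) := (List.getElem_cons_drop hj).symm
        rw [if_pos (Or.inl hi), dif_pos hi, dif_pos hj,
          ih (i + 1) (j + 1) (by omega), hdw, hdd]
        rfl
      · have hdd : ds.drop j = [] := List.drop_eq_nil_of_le (by omega)
        rw [if_pos (Or.inl hi), dif_pos hi, dif_neg hj, hdw, hdd]
        rfl
    · have hdw : ws.drop i = [] := List.drop_eq_nil_of_le (by omega)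
      by_cases hc : i < ws.length ∨ j < ds.length
      · rw [if_pos hc, dif_neg hi, hdw]
        rfl
      · rw [if_neg hc, hdw]
        rfl

theorem pvInterA_eq (ws ds : List (List Char)) (i j : Nat) :
    pvInterA ws ds i j = pvInterL (ws.drop i) (ds.drop j) :=
  pvInterA_eq_aux ws ds ws.length i j (by omega)

-- the refilled run list equals A's interleave of reversed words and delimiters
theorem pvRefill_inter (R : List (Bool × List Char))
    (hchain : List.IsChain (fun a b : Bool × List Char => a.1 ≠ b.1) R) :
    ∀ ws : List (List Char), ws.length = (pvFT R).length →
    pvRefill R ws =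
      match R.head? with
      | some (true, _) => (pvTT R).headD [] ++ pvInterL (ws ++ [[]]) ((pvTT R).tail ++ [[]])
      | some (false, _) => pvInterL (ws ++ [[]]) (pvTT R ++ [[]])
      | none => [] := by
  induction R with
  | nil => intro ws _; rfl
  | cons r R' ih =>
    intro ws hlen
    have hchain' : List.IsChain (fun a b : Bool × List Char => a.1 ≠ b.1) R' := hchain.tail
    cases r with | mk b t =>
    cases b
    · -- word run
      rw [pvFT_cons_false] at hlen
      cases ws with
      | nil => simp at hlen
      | cons w ws' =>
        simp only [List.length_cons, Nat.add_right_cancel_iff] at hlen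
        simp only [pvRefill, List.headD, List.tail, List.head?]
        rw [pvTT_cons_false, ih hchain' ws' hlen]
        cases R' with
        | nil =>
          have : ws' = [] := List.eq_nil_of_length_eq_zero (by simp [pvFT] at hlen ⊢; omega)
          subst this
          simp [pvTT, pvInterL]
        | cons r' R'' =>
          cases r' with | mk b' u =>
          have hb' : b' = true := by
            have hne := (List.isChain_cons_cons.mp hchain).1
            simp only [ne_eq] at hne
            cases b' with
            | true => rfl
            | false => exact absurd rfl hne
          subst hb'
          rw [pvTT_cons_true]
          simp [pvInterL]
    · -- delimiter run
      rw [pvFT_cons_true] at hlen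
      simp only [pvRefill, List.head?]
      rw [pvTT_cons_true, ih hchain' ws hlen]
      cases R' with
      | nil =>
        have : ws = [] := List.eq_nil_of_length_eq_zero (by simp [pvFT] at hlen ⊢; omega)
        subst this
        simp [pvTT, pvInterL]
      | cons r' R'' =>
        cases r' with | mk b' u =>
        have hb' : b' = false := by
          have hne := (List.isChain_cons_cons.mp hchain).1
          simp only [ne_eq] at hne
          cases b' with
          | true => exact absurd rfl hne
          | false => rfl
        subst hb'
        simp

theorem pvGlue_chain (k : Bool) (t : List Char) (rs : List (Bool × List Char))
    (h : List.IsChain (fun a b : Bool × List Char => a.1 ≠ b.1) rs) :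
    List.IsChain (fun a b : Bool × List Char => a.1 ≠ b.1) (pvGlue k t rs) := by
  cases rs with
  | nil => simp [pvGlue]
  | cons r rs' =>
    cases r with | mk b u =>
    by_cases hk : k = b
    · subst hk
      have hg : pvGlue k t ((k, u) :: rs') = (k, t ++ u) :: rs' := by simp [pvGlue]
      rw [hg]
      cases rs' with
      | nil => simp
      | cons r' rs'' =>
        rw [List.isChain_cons_cons] at h ⊢
        exact ⟨h.1, h.2⟩
    · simp only [pvGlue, if_neg hk]
      rw [List.isChain_cons_cons]
      exact ⟨hk, h⟩

theorem pvRuns_chain (p : Char → Bool) (cs : List Char) :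
    List.IsChain (fun a b : Bool × List Char => a.1 ≠ b.1) (pvRuns p cs) := by
  induction cs with
  | nil => simp [pvRuns]
  | cons c rest ih => rw [pvRuns_cons]; exact pvGlue_chain _ _ _ ih

theorem pvRuns_head (p : Char → Bool) (c : Char) (cs : List Char) :
    ∃ u, (pvRuns p (c :: cs)).head? = some (p c, u) := by
  rw [pvRuns_cons]; exact pvGlue_head _ _ _

-- ===== VERDICT (by name: the statement is the Claim_ definition above) =====
theorem rev_words_spec : Claim_equal_rev_words := by
  intro string delimiters _
  unfold Spec_rev_words rev_words rev_words_alt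
  cases hcs : string.toList with
  | nil => simp
  | cons c rest =>
    simp only [List.length_cons, Nat.succ_ne_zero]
    set p := pvIsDelim delimiters with hp
    set R := pvRuns p (c :: rest) with hR
    have hscan := pvScanA_runs p c rest
    have hchain : List.IsChain (fun a b : Bool × List Char => a.1 ≠ b.1) R := pvRuns_chain p _
    obtain ⟨u, hhead⟩ := pvRuns_head p c rest
    rw [← hR] at hhead
    have hrefill := pvRefill_inter R hchain ((pvFT R).reverse) (by simp)
    -- reduce A's words₁/delims₁ via the scan invariant
    have h1 : (if (pvScanA p (c :: rest) [] [] false []).2.2.1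
        then (pvScanA p (c :: rest) [] [] false []).1
        else (pvScanA p (c :: rest) [] [] false []).1 ++ [(pvScanA p (c :: rest) [] [] false []).2.2.2]) = pvFT R := by
      have := congrArg Prod.fst hscan
      simpa [pvPost, apply_ite Prod.fst, ← hR] using this
    have h2 : (if (pvScanA p (c :: rest) [] [] false []).2.2.1
        then (pvScanA p (c :: rest) [] [] false []).2.1 ++ [(pvScanA p (c :: rest) [] [] false []).2.2.2]
        else (pvScanA p (c :: rest) [] [] false []).2.1) = pvTT R := by
      have := congrArg Prod.snd hscan
      simpa [pvPost, apply_ite Prod.snd, ← hR] using this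
    simp only [List.headD_cons, h1, h2]
    rw [pvInterA_eq]
    have hfold : (List.map (fun x => x.2) (List.filter (fun r => !r.1) R)).reverse
        = (pvFT R).reverse := rfl
    rw [hfold, hrefill, hhead]
    -- case on the kind of the first run (= p c)
    by_cases hc : p c
    · -- string starts with a delimiter: the first delimiter run leads
      obtain ⟨tl, htl⟩ : ∃ tl, pvTT R = u :: tl := by
        cases hRv : R with
        | nil => rw [hRv] at hhead; simp at hhead
        | cons r R' =>
          rw [hRv] at hhead
          simp only [List.head?_cons, Option.some.injEq] at hhead
          refine ⟨pvTT R', ?_⟩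
          rw [hhead, hc, pvTT_cons_true]
      simp [hc, htl]
    · -- string starts with a word
      have hcf : p c = false := by simpa using hc
      simp [hcf]
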